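-- pv_equiv track=rewrite | github.com/FennexFox/packetflow_foundry | builders/packet-workflow/retained-skills/gh-fix-pr-writeup/scripts/lint_pr_writeup.py | full_rewrite_relative_to_original
-- ===== SOURCE A (Python) =====
-- def section_bodies(markdown_text: str) -> dict[str, str]:
--     result: dict[str, str] = {}
--     current = None
--     buffer: list[str] = []
--     for line in markdown_text.splitlines():
--         if line.startswith("## "):
--             if current is not None:
--                 result[current] = "\n".join(buffer).strip()
--             current = line[3:].strip()
--             buffer = []
--         elif current is not None:
--             buffer.append(line)
--     if current is not None:
--         result[current] = "\n".join(buffer).strip()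
--     return result
--
-- def full_rewrite_relative_to_original(candidate_context: dict, original_context: dict) -> bool:
--     candidate_sections = section_bodies(str(candidate_context.get("pr", {}).get("body") or ""))
--     original_sections = section_bodies(str(original_context.get("pr", {}).get("body") or ""))
--     shared_sections = [name for name in candidate_sections if name in original_sections]
--     if not shared_sections:
--         return False
--     changed_sections = 0
--     for section in shared_sections:
--         if candidate_sections.get(section, "").strip() != original_sections.get(section, "").strip():
--             changed_sections += 1
--     if len(shared_sections) >= 4 and changed_sections >= max(4, len(shared_sections) - 1):
--         return True
--     candidate_title = str(candidate_context.get("pr", {}).get("title") or "").strip()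
--     original_title = str(original_context.get("pr", {}).get("title") or "").strip()
--     return candidate_title != original_title and changed_sections == len(shared_sections)
-- ===== SOURCE B (Python) =====
-- def _take_body(lines):
--     """Split lines at the first '## ' header line: (prefix, rest-from-header)."""
--     for i, line in enumerate(lines):
--         if line.startswith("## "):
--             return lines[:i], lines[i:]
--     return lines, []
--
--
-- def _chunks(lines):
--     """lines is [] or starts with a header line; produce (name, body) per section."""
--     out = []
--     while lines:
--         body, rest = _take_body(lines[1:])
--         out.append((lines[0][3:].strip(), "\n".join(body).strip()))
--         lines = rest
--     return out
--
--
-- def section_bodies(markdown_text: str) -> dict[str, str]: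
--     _, tail = _take_body(markdown_text.splitlines())  # discard preamble before first header
--     return dict(_chunks(tail))
--
--
-- def full_rewrite_relative_to_original(candidate_context: dict, original_context: dict) -> bool:
--     candidate_sections = section_bodies(str(candidate_context.get("pr", {}).get("body") or ""))
--     original_sections = section_bodies(str(original_context.get("pr", {}).get("body") or ""))
--     shared = [name for name in candidate_sections if name in original_sections]
--     if not shared:
--         return False
--     changed = sum(
--         1 for s in shared
--         if candidate_sections.get(s, "").strip() != original_sections.get(s, "").strip()
--     )
--     if len(shared) >= 4 and changed >= max(4, len(shared) - 1):
--         return True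
--     candidate_title = str(candidate_context.get("pr", {}).get("title") or "").strip()
--     original_title = str(original_context.get("pr", {}).get("title") or "").strip()
--     return candidate_title != original_title and changed == len(shared)
-- ===== Notes on version B (the rewrite author's own statement) =====
-- stated objective: alternative
-- what changed: section_bodies is rewritten from a line-by-line state machine (current section + buffer, flushed at each header) into a chunking parser that drops the preamble and splits the line list at each '## ' header into (name, body) pairs fed to dict(), and the changed-section counter loop becomes a sum over a generator (countP in the port).
import Mathlib
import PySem

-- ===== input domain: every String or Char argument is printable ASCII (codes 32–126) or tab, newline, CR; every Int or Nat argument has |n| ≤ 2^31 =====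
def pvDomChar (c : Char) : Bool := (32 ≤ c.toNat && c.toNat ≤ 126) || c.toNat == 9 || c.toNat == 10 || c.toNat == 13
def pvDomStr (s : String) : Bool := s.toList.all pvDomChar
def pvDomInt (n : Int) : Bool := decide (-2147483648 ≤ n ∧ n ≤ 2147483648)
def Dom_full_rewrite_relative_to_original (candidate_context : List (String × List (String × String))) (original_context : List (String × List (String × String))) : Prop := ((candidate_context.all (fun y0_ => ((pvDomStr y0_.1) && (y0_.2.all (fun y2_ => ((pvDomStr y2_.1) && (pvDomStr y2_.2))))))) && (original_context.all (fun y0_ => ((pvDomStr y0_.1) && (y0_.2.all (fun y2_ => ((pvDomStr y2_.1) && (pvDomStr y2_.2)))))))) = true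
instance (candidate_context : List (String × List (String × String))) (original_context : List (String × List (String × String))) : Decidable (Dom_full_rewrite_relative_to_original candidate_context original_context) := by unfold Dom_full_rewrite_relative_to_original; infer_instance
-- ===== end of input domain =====

-- B replaces A's line-by-line state machine (current section + buffer) by a chunking parser:
-- drop the preamble, split the line list at each '## ' header, emit (name, body) pairs, dict() them;
-- the changed-section loop counter becomes a countP. Objective: alternative decomposition, not speed.

-- ===== PORT A =====
-- the 'for line in splitlines' state machine of A's section_bodies: state = (result, current, buffer)
def secA_go : List String → PySem.Dict String String → Option String → List String → PySem.Dict String String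
  | [], result, current, buffer =>
    match current with
    | some c => result.insert c (PySem.Str.strip (PySem.Str.join "\n" buffer))
    | none   => result
  | line :: rest, result, current, buffer =>
    if PySem.Str.startswith line "## " then
      let result' :=
        match current with
        | some c => result.insert c (PySem.Str.strip (PySem.Str.join "\n" buffer))
        | none   => result
      secA_go rest result' (some (PySem.Str.strip (PySem.Str.slice line (some 3) none))) []
    else
      match current with
      | some _ => secA_go rest result current (buffer ++ [line])
      | none   => secA_go rest result current buffer

def secA (markdown_text : String) : PySem.Dict String String :=
  secA_go (PySem.Str.splitlines markdown_text) PySem.Dict.empty none []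

def full_rewrite_relative_to_original (candidate_context : List (String × List (String × String))) (original_context : List (String × List (String × String))) : Bool :=
  -- ctx.get("pr", {}) ; str(….get("body") or "") is (get? …).getD "" for string values
  let cpr := PySem.Dict.mk (PySem.Dict.getD (PySem.Dict.mk candidate_context) "pr" [])
  let opr := PySem.Dict.mk (PySem.Dict.getD (PySem.Dict.mk original_context) "pr" [])
  let candidate_sections := secA ((PySem.Dict.get? cpr "body").getD "")
  let original_sections := secA ((PySem.Dict.get? opr "body").getD "")
  let shared_sections := candidate_sections.keys.filter (fun name => original_sections.contains name)
  if shared_sections.isEmpty then false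
  else
    let changed_sections : Int :=
      shared_sections.foldl (fun acc sec =>
        if PySem.Str.strip (PySem.Dict.getD candidate_sections sec "") ≠ PySem.Str.strip (PySem.Dict.getD original_sections sec "")
        then acc + 1 else acc) 0
    if shared_sections.length ≥ 4 ∧ changed_sections ≥ max 4 ((shared_sections.length : Int) - 1) then true
    else
      let candidate_title := PySem.Str.strip ((PySem.Dict.get? cpr "title").getD "")
      let original_title := PySem.Str.strip ((PySem.Dict.get? opr "title").getD "")
      decide (candidate_title ≠ original_title) && decide (changed_sections = (shared_sections.length : Int))

-- ===== PORT B =====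
-- _take_body: longest header-free prefix of the lines, and the rest (starting at a header)
def secB_takeBody : List String → List String × List String
  | [] => ([], [])
  | line :: rest =>
    if PySem.Str.startswith line "## " then ([], line :: rest)
    else
      ((secB_takeBody rest).1.cons line, (secB_takeBody rest).2)

theorem secB_takeBody_snd_len (ls : List String) : (secB_takeBody ls).2.length ≤ ls.length := by
  induction ls with
  | nil => simp [secB_takeBody]
  | cons l rest ih =>
    simp only [secB_takeBody]
    split
    · simp
    · simpa using Nat.le_succ_of_le ih

-- _chunks: one (name, body) pair per section, chunked at header lines
def secB_chunks : List String → List (String × String)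
  | [] => []
  | line :: rest =>
    (PySem.Str.strip (PySem.Str.slice line (some 3) none),
     PySem.Str.strip (PySem.Str.join "\n" (secB_takeBody rest).1)) :: secB_chunks (secB_takeBody rest).2
  termination_by ls => ls.length
  decreasing_by exact Nat.lt_succ_of_le (secB_takeBody_snd_len rest)

def secB (markdown_text : String) : PySem.Dict String String :=
  PySem.Dict.ofList (secB_chunks (secB_takeBody (PySem.Str.splitlines markdown_text)).2)

def full_rewrite_relative_to_original_alt (candidate_context : List (String × List (String × String))) (original_context : List (String × List (String × String))) : Bool :=
  let cpr := PySem.Dict.mk (PySem.Dict.getD (PySem.Dict.mk candidate_context) "pr" [])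
  let opr := PySem.Dict.mk (PySem.Dict.getD (PySem.Dict.mk original_context) "pr" [])
  let candidate_sections := secB ((PySem.Dict.get? cpr "body").getD "")
  let original_sections := secB ((PySem.Dict.get? opr "body").getD "")
  let shared := candidate_sections.keys.filter (fun name => original_sections.contains name)
  if shared.isEmpty then false
  else
    -- changed = sum(1 for s in shared if …) is a countP
    let changed : Int :=
      (shared.countP (fun s => decide (PySem.Str.strip (PySem.Dict.getD candidate_sections s "") ≠ PySem.Str.strip (PySem.Dict.getD original_sections s ""))) : Nat)
    if shared.length ≥ 4 ∧ changed ≥ max 4 ((shared.length : Int) - 1) then true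
    else
      let candidate_title := PySem.Str.strip ((PySem.Dict.get? cpr "title").getD "")
      let original_title := PySem.Str.strip ((PySem.Dict.get? opr "title").getD "")
      decide (candidate_title ≠ original_title) && decide (changed = (shared.length : Int))

-- ===== PRECONDITION & SPEC =====
def Spec_full_rewrite_relative_to_original (candidate_context : List (String × List (String × String))) (original_context : List (String × List (String × String))) (out : Bool) : Prop := out = full_rewrite_relative_to_original_alt candidate_context original_context
instance (candidate_context : List (String × List (String × String))) (original_context : List (String × List (String × String))) (out : Bool) : Decidable (Spec_full_rewrite_relative_to_original candidate_context original_context out) := by unfold Spec_full_rewrite_relative_to_original; infer_instance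

-- ===== CLAIM (what is proved, stated in full; the proofs are below) =====
def Claim_equal_full_rewrite_relative_to_original : Prop := ∀ (candidate_context : List (String × List (String × String))) (original_context : List (String × List (String × String))), Dom_full_rewrite_relative_to_original candidate_context original_context → Spec_full_rewrite_relative_to_original candidate_context original_context (full_rewrite_relative_to_original candidate_context original_context)

-- ===== LEMMAS AND PROOFS =====

-- A's state machine with an open section (current = some c, buffer = buf) finishes the open
-- section with the header-free prefix of the remaining lines, then folds B's chunks in.
theorem secA_go_some (ls : List String) : ∀ (r : PySem.Dict String String) (c : String) (buf : List String),
    secA_go ls r (some c) buf =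
      (secB_chunks (secB_takeBody ls).2).foldl (fun acc p => acc.insert p.1 p.2)
        (r.insert c (PySem.Str.strip (PySem.Str.join "\n" (buf ++ (secB_takeBody ls).1)))) := by
  induction ls with
  | nil => intro r c buf; simp [secA_go, secB_takeBody, secB_chunks]
  | cons line rest ih =>
    intro r c buf
    by_cases h : PySem.Str.startswith line "## " = true
    · rw [secA_go, secB_takeBody]
      simp only [h, if_pos]
      rw [ih, secB_chunks]
      simp
    · rw [secA_go, secB_takeBody]
      simp only [h, Bool.false_eq_true, if_false]
      rw [ih]
      simp

theorem secA_go_none (ls : List String) : ∀ (r : PySem.Dict String String) (buf : List String),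
    secA_go ls r none buf =
      (secB_chunks (secB_takeBody ls).2).foldl (fun acc p => acc.insert p.1 p.2) r := by
  induction ls with
  | nil => intro r buf; simp [secA_go, secB_takeBody, secB_chunks]
  | cons line rest ih =>
    intro r buf
    by_cases h : PySem.Str.startswith line "## " = true
    · rw [secA_go, secB_takeBody]
      simp only [h, if_pos]
      rw [secA_go_some, secB_chunks]
      simp
    · rw [secA_go, secB_takeBody]
      simp only [h, Bool.false_eq_true, if_false]
      exact ih r buf

theorem secA_eq_secB (t : String) : secA t = secB t := by
  rw [secA, secB, secA_go_none, PySem.Dict.ofList, PySem.Dict.update]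

-- ===== VERDICT (by name: the statement is the Claim_ definition above) =====
theorem full_rewrite_relative_to_original_spec : Claim_equal_full_rewrite_relative_to_original := by
  intro cc oc _
  unfold Spec_full_rewrite_relative_to_original
  unfold full_rewrite_relative_to_original full_rewrite_relative_to_original_alt
  simp only [secA_eq_secB, PySem.List.foldl_ite_add_one, zero_add]
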